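-- pv_equiv track=rewrite | github.com/Ramin-cs/RezaRepo | advanced_payloads.py | generate_parameter_specific_payloads
-- ===== SOURCE A (Python) =====
-- from typing import List, Dict
--
-- def generate_parameter_specific_payloads(param_name: str) -> List[str]:
--     """Generate parameter name-specific payloads"""
--     payloads = []
--     param_lower = param_name.lower()
--
--     # Callback parameters
--     if 'callback' in param_lower:
--         payloads.extend([
--             "//evil.com/callback/hijacked",
--             "javascript:confirm('Callback Hijacked')",
--             "https://attacker.com/steal/callback"
--         ])
--
--     # Success URL parameters
--     elif 'success' in param_lower:
--         payloads.extend([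
--             "//evil.com/fake/success",
--             "//attacker.com/phishing/success",
--             "javascript:alert('Success Page Hijacked')"
--         ])
--
--     # Next/Continue parameters
--     elif any(keyword in param_lower for keyword in ['next', 'continue', 'forward']):
--         payloads.extend([
--             "//evil.com",
--             "//attacker.com/next/step",
--             "//malicious.com/continue/process"
--         ])
--
--     # Return URL parameters
--     elif 'return' in param_lower:
--         payloads.extend([
--             "//evil.com/return/hijacked",
--             "//attacker.com/fake/return",
--             "javascript:confirm('Return URL Hijacked')"
--         ])
--
--     return payloads
-- ===== SOURCE B (Python) =====
-- from typing import List
--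
-- # Flat keyword -> priority map (lower number = higher priority, matching A's
-- # elif order) plus a payload table indexed by priority.  Instead of testing
-- # rules in order and stopping at the first hit, B checks EVERY keyword,
-- # collects the priorities of all keywords present, and returns the payload
-- # list of the best (minimal) priority found.
-- _KEYWORD_PRIORITY = {
--     "callback": 0,
--     "success": 1,
--     "next": 2,
--     "continue": 2,
--     "forward": 2,
--     "return": 3,
-- }
--
-- _PAYLOADS = [
--     ["//evil.com/callback/hijacked",
--      "javascript:confirm('Callback Hijacked')",
--      "https://attacker.com/steal/callback"],
--     ["//evil.com/fake/success",
--      "//attacker.com/phishing/success",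
--      "javascript:alert('Success Page Hijacked')"],
--     ["//evil.com",
--      "//attacker.com/next/step",
--      "//malicious.com/continue/process"],
--     ["//evil.com/return/hijacked",
--      "//attacker.com/fake/return",
--      "javascript:confirm('Return URL Hijacked')"],
-- ]
--
-- def generate_parameter_specific_payloads(param_name: str) -> List[str]:
--     param_lower = param_name.lower()
--     best = min((prio for kw, prio in _KEYWORD_PRIORITY.items() if kw in param_lower),
--                default=None)
--     return [] if best is None else list(_PAYLOADS[best])
-- ===== Notes on version B (the rewrite author's own statement) =====
-- stated objective: alternative
-- what changed: Instead of an ordered if/elif chain that stops at the first matching branch, B tests every keyword against the lowered name, takes the minimum priority among all matches via a keyword->priority map, and indexes a payload table with it.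
import Mathlib
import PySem

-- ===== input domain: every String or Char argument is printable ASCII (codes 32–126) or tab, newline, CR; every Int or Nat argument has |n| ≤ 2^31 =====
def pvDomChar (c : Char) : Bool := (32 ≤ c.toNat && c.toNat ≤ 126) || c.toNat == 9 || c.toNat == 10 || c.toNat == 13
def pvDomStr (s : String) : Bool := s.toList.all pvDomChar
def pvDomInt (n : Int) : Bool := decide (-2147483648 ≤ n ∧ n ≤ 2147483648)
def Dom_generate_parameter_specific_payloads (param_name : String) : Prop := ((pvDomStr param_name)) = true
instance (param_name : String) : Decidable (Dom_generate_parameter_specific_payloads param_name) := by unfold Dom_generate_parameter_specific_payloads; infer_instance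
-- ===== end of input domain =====

-- ===== PORT A =====
-- B replaces A's first-match if/elif chain by a min-priority selection over a keyword->priority map; same values everywhere.
def generate_parameter_specific_payloads (param_name : String) : List String :=
  let payloads : List String := []
  let param_lower := PySem.Str.lower param_name
  if PySem.Str.isIn "callback" param_lower then
    payloads ++ ["//evil.com/callback/hijacked",
      "javascript:confirm('Callback Hijacked')",
      "https://attacker.com/steal/callback"]
  else if PySem.Str.isIn "success" param_lower then
    payloads ++ ["//evil.com/fake/success",
      "//attacker.com/phishing/success",
      "javascript:alert('Success Page Hijacked')"]
  else if ["next", "continue", "forward"].any (fun k => PySem.Str.isIn k param_lower) then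
    payloads ++ ["//evil.com",
      "//attacker.com/next/step",
      "//malicious.com/continue/process"]
  else if PySem.Str.isIn "return" param_lower then
    payloads ++ ["//evil.com/return/hijacked",
      "//attacker.com/fake/return",
      "javascript:confirm('Return URL Hijacked')"]
  else payloads

-- ===== PORT B =====
def pvKwPriority : List (String × Nat) :=
  [("callback", 0), ("success", 1), ("next", 2), ("continue", 2), ("forward", 2), ("return", 3)]

def pvPayloadTable : List (List String) :=
  [ ["//evil.com/callback/hijacked",
     "javascript:confirm('Callback Hijacked')",
     "https://attacker.com/steal/callback"],
    ["//evil.com/fake/success",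
     "//attacker.com/phishing/success",
     "javascript:alert('Success Page Hijacked')"],
    ["//evil.com",
     "//attacker.com/next/step",
     "//malicious.com/continue/process"],
    ["//evil.com/return/hijacked",
     "//attacker.com/fake/return",
     "javascript:confirm('Return URL Hijacked')"] ]

-- min(...) over the priorities of all matching keywords (none if no keyword matches)
def generate_parameter_specific_payloads_alt (param_name : String) : List String :=
  let param_lower := PySem.Str.lower param_name
  let best : Option Nat := pvKwPriority.foldl
    (fun acc kp =>
      if PySem.Str.isIn kp.1 param_lower then
        match acc with
        | none => some kp.2
        | some m => some (min m kp.2)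
      else acc) none
  match best with
  | none => []
  | some i => pvPayloadTable.getD i []

-- ===== PRECONDITION & SPEC =====
def Spec_generate_parameter_specific_payloads (param_name : String) (out : List String) : Prop := out = generate_parameter_specific_payloads_alt param_name
instance (param_name : String) (out : List String) : Decidable (Spec_generate_parameter_specific_payloads param_name out) := by unfold Spec_generate_parameter_specific_payloads; infer_instance

-- ===== CLAIM =====
def Claim_equal_generate_parameter_specific_payloads : Prop := ∀ (param_name : String), Dom_generate_parameter_specific_payloads param_name → Spec_generate_parameter_specific_payloads param_name (generate_parameter_specific_payloads param_name)

-- ===== LEMMAS AND PROOFS =====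

-- ===== VERDICT =====
theorem generate_parameter_specific_payloads_spec : Claim_equal_generate_parameter_specific_payloads := by
  intro param_name _
  unfold Spec_generate_parameter_specific_payloads
  simp only [generate_parameter_specific_payloads, generate_parameter_specific_payloads_alt,
    pvKwPriority, pvPayloadTable, List.any, List.foldl, List.nil_append]
  generalize PySem.Str.isIn "callback" (PySem.Str.lower param_name) = b1
  generalize PySem.Str.isIn "success" (PySem.Str.lower param_name) = b2
  generalize PySem.Str.isIn "next" (PySem.Str.lower param_name) = b3
  generalize PySem.Str.isIn "continue" (PySem.Str.lower param_name) = b4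
  generalize PySem.Str.isIn "forward" (PySem.Str.lower param_name) = b5
  generalize PySem.Str.isIn "return" (PySem.Str.lower param_name) = b6
  revert b1 b2 b3 b4 b5 b6
  decide
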